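-- pv_equiv track=rewrite | github.com/awaddell77/Report-Processing | import_text.py | insert_delim
-- ===== SOURCE A (Python) =====
-- def insert_delim(t_data,locs, header_line=0, delim = '\t'):
-- 	if len(delim) >= 2: locs = [locs[i] + (len(delim)-1) for i in range(0, len(locs))]
-- 	#above code does not work for any value of length of delim greater than 2
-- 	else: locs = [locs[i] + 1 for i in range(0, len(locs))]
-- 	for line in range(header_line, len(t_data)):
-- 		new_ln = ''
-- 		for i in range(0, len(t_data[line])):
-- 			if i not in locs:new_ln += t_data[line][i]
-- 			else:
-- 				new_ln += delim + t_data[line][i]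
-- 				#if not line:
-- 		t_data[line] = new_ln
-- 	return t_data
-- ===== SOURCE B (Python) =====
-- def _split_at(s, pts):
--     if not pts:
--         return [s]
--     p = pts[0]
--     return [s[:p]] + _split_at(s[p:], [q - p for q in pts[1:]])
--
--
-- def insert_delim(t_data, locs, header_line=0, delim='\t'):
--     off = len(delim) - 1 if len(delim) >= 2 else 1
--     positions = sorted({l + off for l in locs})
--     for line in range(header_line, len(t_data)):
--         s = t_data[line]
--         pts = [p for p in positions if 0 <= p < len(s)]
--         t_data[line] = delim.join(_split_at(s, pts))
--     return t_data
-- ===== Notes on version B (the rewrite author's own statement) =====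
-- stated objective: faster
-- what changed: B precomputes a sorted, deduplicated set of adjusted insertion points once and rebuilds each line by slicing it into segments at those points and joining them with the delimiter, replacing A's per-character loop that tests every character index for membership in the (duplicate-keeping) adjusted locs list.
import Mathlib
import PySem

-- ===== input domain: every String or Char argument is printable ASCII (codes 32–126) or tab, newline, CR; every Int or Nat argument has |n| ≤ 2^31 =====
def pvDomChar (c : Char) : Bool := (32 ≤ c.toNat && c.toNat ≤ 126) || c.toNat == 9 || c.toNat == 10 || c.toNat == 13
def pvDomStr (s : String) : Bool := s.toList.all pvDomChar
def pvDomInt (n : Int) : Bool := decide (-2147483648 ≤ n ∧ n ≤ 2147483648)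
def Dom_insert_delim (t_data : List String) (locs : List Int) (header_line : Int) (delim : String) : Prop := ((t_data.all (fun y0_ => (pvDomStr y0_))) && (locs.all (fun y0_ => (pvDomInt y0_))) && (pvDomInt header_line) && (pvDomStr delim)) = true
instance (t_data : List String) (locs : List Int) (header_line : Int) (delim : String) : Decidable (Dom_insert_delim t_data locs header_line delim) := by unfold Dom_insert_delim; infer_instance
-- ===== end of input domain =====

-- B replaces A's per-character loop with a list-membership test by a sorted set of insertion
-- points and slice-then-join segmentation (objective: alternative decomposition; same in-place
-- mutation in Python — the equivalence proved here is about the returned list of lines).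

-- ===== PORT A =====
def insert_delim (t_data : List String) (locs : List Int) (header_line : Int) (delim : String) : List String :=
  let locs' : List Int :=
    if 2 ≤ PySem.Str.len delim then
      (PySem.List.pyRange 0 (PySem.List.len locs) 1).map
        (fun i => PySem.List.pyGetD locs i 0 + (PySem.Str.len delim - 1))
    else
      (PySem.List.pyRange 0 (PySem.List.len locs) 1).map
        (fun i => PySem.List.pyGetD locs i 0 + 1)
  (PySem.List.pyRange header_line (PySem.List.len t_data) 1).foldl (fun td line =>
    let s := PySem.List.pyGetD td line ""
    let new_ln := (PySem.List.pyRange 0 (PySem.Str.len s) 1).foldl (fun nl i =>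
      if ¬ i ∈ locs' then nl ++ [PySem.List.pyGetD s.toList i ' ']
      else nl ++ delim.toList ++ [PySem.List.pyGetD s.toList i ' ']) []
    PySem.List.pySetD td line (String.ofList new_ln)) t_data

-- ===== PORT B =====
-- _split_at from Source B: split at the first point, recurse on the tail with shifted points
def splitAtPts : List Char → List Int → List (List Char)
  | s, [] => [s]
  | s, p :: ps =>
      PySem.List.slice s none (some p) ::
        splitAtPts (PySem.List.slice s (some p) none) (ps.map (fun q => q - p))
  termination_by _ pts => pts.length
  decreasing_by simp

def insert_delim_alt (t_data : List String) (locs : List Int) (header_line : Int) (delim : String) : List String :=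
  let off : Int := if 2 ≤ PySem.Str.len delim then PySem.Str.len delim - 1 else 1
  let positions := PySem.List.sorted (PySem.Set.ofList (locs.map (fun l => l + off))) (fun x => x) false
  (PySem.List.pyRange header_line (PySem.List.len t_data) 1).foldl (fun td line =>
    let s := PySem.List.pyGetD td line ""
    let pts := positions.filter (fun p => decide (0 ≤ p ∧ p < PySem.Str.len s))
    PySem.List.pySetD td line
      (String.ofList (PySem.Chars.join delim.toList (splitAtPts s.toList pts)))) t_data

-- ===== PRECONDITION & SPEC =====
-- Pre_ excludes exactly the inputs where the Python A raises IndexError: a header_line below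
-- -len(t_data) makes Python's negative indexing t_data[line] fall off the front.
def Pre_insert_delim (t_data : List String) (locs : List Int) (header_line : Int) (delim : String) : Prop :=
  -(t_data.length : Int) ≤ header_line
instance (t_data : List String) (locs : List Int) (header_line : Int) (delim : String) : Decidable (Pre_insert_delim t_data locs header_line delim) := by unfold Pre_insert_delim; infer_instance

def pvWitness_insert_delim : List String × List Int × Int × String := (["ab,cd", ",x"], [2, 0], 0, ",")

def Spec_insert_delim (t_data : List String) (locs : List Int) (header_line : Int) (delim : String) (out : List String) : Prop := out = insert_delim_alt t_data locs header_line delim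
instance (t_data : List String) (locs : List Int) (header_line : Int) (delim : String) (out : List String) : Decidable (Spec_insert_delim t_data locs header_line delim out) := by unfold Spec_insert_delim; infer_instance

-- ===== CLAIM (what is proved, stated in full; the proofs are below) =====
def Claim_equal_insert_delim : Prop := ∀ (t_data : List String) (locs : List Int) (header_line : Int) (delim : String), Dom_insert_delim t_data locs header_line delim → Pre_insert_delim t_data locs header_line delim → Spec_insert_delim t_data locs header_line delim (insert_delim t_data locs header_line delim)

-- ===== LEMMAS AND PROOFS =====

-- canonical form both line transforms are reduced to: walk the characters, inserting dl before
-- the character at every (shifted-to-zero) position listed in L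
def insChars (dl : List Char) : List Int → List Char → List Char
  | _, [] => []
  | L, c :: cs => (if (0:Int) ∈ L then dl ++ [c] else [c]) ++ insChars dl (L.map (fun q => q - 1)) cs

theorem mem_map_sub (L : List Int) (p i : Int) : i - p ∈ L.map (fun q => q - p) ↔ i ∈ L := by
  simp only [List.mem_map]
  constructor
  · rintro ⟨q, hq, h⟩
    have : q = i := by omega
    exact this ▸ hq
  · intro h; exact ⟨i, h, rfl⟩

theorem ins_nil (dl : List Char) (cs : List Char) : insChars dl [] cs = cs := by
  induction cs with
  | nil => rfl
  | cons c cs ih => simp [insChars, ih]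

theorem ins_neg (dl : List Char) (cs : List Char) : ∀ (L : List Int) (x : Int), x < 0 →
    insChars dl (x :: L) cs = insChars dl L cs := by
  induction cs with
  | nil => intro L x _; rfl
  | cons c cs ih =>
    intro L x hx
    simp only [insChars, List.mem_cons, List.map_cons]
    rw [ih (L.map (fun q => q - 1)) (x - 1) (by omega)]
    have hne : ¬ ((0:Int) = x) := by omega
    simp [hne]

theorem ins_shift (dl : List Char) : ∀ (n : Nat) (cs : List Char) (L : List Int),
    n ≤ cs.length → (∀ q ∈ L, (n : Int) ≤ q) →
    insChars dl L cs = cs.take n ++ insChars dl (L.map (fun q => q - n)) (cs.drop n) := by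
  intro n
  induction n with
  | zero =>
    intro cs L _ _
    simp
  | succ n ih =>
    intro cs L hlen hq
    match cs with
    | [] => simp at hlen
    | c :: cs =>
      have h0 : ¬ (0:Int) ∈ L := fun h => by have := hq 0 h; omega
      simp only [insChars, if_neg h0]
      rw [ih cs (L.map (fun q => q - 1)) (by simpa using hlen)
        (by intro q hq'; simp only [List.mem_map] at hq'; obtain ⟨r, hr, rfl⟩ := hq'
            have := hq r hr; push_cast; omega)]
      have hmap : (L.map (fun q => q - 1)).map (fun q => q - (n : Int))
          = L.map (fun q => q - ((n + 1 : Nat) : Int)) := by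
        rw [List.map_map]
        apply List.map_congr_left
        intro q _
        simp only [Function.comp]
        push_cast
        ring
      rw [hmap]
      simp [List.take_succ_cons, List.drop_succ_cons]

theorem splitAtPts_ne_nil (cs : List Char) (pts : List Int) : splitAtPts cs pts ≠ [] := by
  cases pts <;> simp [splitAtPts]

theorem join_split (dl : List Char) (pts : List Int) (cs : List Char)
    (hpw : pts.Pairwise (· < ·)) (hb : ∀ p ∈ pts, 0 ≤ p ∧ p < (cs.length : Int)) :
    PySem.Chars.join dl (splitAtPts cs pts) = insChars dl pts cs := by
  match pts, hpw, hb with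
  | [], _, _ =>
    simp [splitAtPts, PySem.Chars.join_singleton, ins_nil]
  | p :: ps, hpw, hb =>
    obtain ⟨hp0, hplen⟩ := hb p (by simp)
    have hpair := (List.pairwise_cons.mp hpw).1
    have hps := (List.pairwise_cons.mp hpw).2
    have hcast : ((p.toNat : Nat) : Int) = p := Int.toNat_of_nonneg hp0
    have hn : p.toNat ≤ cs.length := by omega
    have hnlt : p.toNat < cs.length := by omega
    -- left side: peel the first segment
    simp only [splitAtPts]
    rw [PySem.List.slice_to cs hp0, PySem.List.slice_from cs hp0]
    obtain ⟨a, l, heq⟩ := List.exists_cons_of_ne_nil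
      (splitAtPts_ne_nil (cs.drop p.toNat) (ps.map (fun q => q - p)))
    rw [heq, PySem.Chars.join_cons_cons, ← heq]
    have hih : PySem.Chars.join dl (splitAtPts (cs.drop p.toNat) (ps.map (fun q => q - p)))
        = insChars dl (ps.map (fun q => q - p)) (cs.drop p.toNat) := by
      apply join_split
      · exact List.pairwise_map.mpr (hps.imp (by intro a b hab; omega))
      · intro q' hq'
        simp only [List.mem_map] at hq'
        obtain ⟨q, hq, rfl⟩ := hq'
        have h1 := hpair q hq
        have h2 := (hb q (by simp [hq])).2
        have h3 : (cs.drop p.toNat).length = cs.length - p.toNat := by simp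
        rw [h3]
        omega
    rw [hih]
    -- right side: shift by p, then fire the insertion at the head of the dropped tail
    rw [ins_shift dl p.toNat cs (p :: ps) hn
      (by
        intro q hq
        rw [hcast]
        cases hq with
        | head => omega
        | tail _ h => exact le_of_lt (hpair q h))]
    have hmapc : (p :: ps).map (fun q => q - (p.toNat : Int)) = (0 : Int) :: ps.map (fun q => q - p) := by
      rw [hcast]
      simp
    rw [hmapc]
    have hdropne : cs.drop p.toNat ≠ [] := by
      simp only [ne_eq, List.drop_eq_nil_iff]
      omega
    obtain ⟨c, cs'', hdrop⟩ := List.exists_cons_of_ne_nil hdropne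
    rw [hdrop]
    have hps0 : ¬ ((0:Int) ∈ ps.map (fun q => q - p)) := by
      simp only [List.mem_map, not_exists]
      rintro q ⟨hq, h⟩
      have := hpair q hq
      omega
    simp only [insChars, List.mem_cons, List.map_cons]
    rw [ins_neg dl cs'' (List.map (fun q => q - 1) (List.map (fun q => q - p) ps)) (0 - 1) (by omega)]
    rw [if_neg hps0]
    simp [List.append_assoc]
  termination_by pts.length
  decreasing_by simp

theorem ins_snoc (dl : List Char) : ∀ (xs : List Char) (x : Char) (L : List Int),
    insChars dl L (xs ++ [x]) =
      insChars dl L xs ++ (if ((xs.length : Nat) : Int) ∈ L then dl ++ [x] else [x]) := by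
  intro xs
  induction xs with
  | nil => intro x L; simp [insChars]
  | cons c cs ih =>
    intro x L
    have hm : (((cs.length : Nat) : Int) ∈ L.map (fun q => q - 1)) = ((((c :: cs).length : Nat) : Int) ∈ L) := by
      have h := mem_map_sub L 1 (((cs.length : Nat) : Int) + 1)
      rw [show ((cs.length : Int) + 1 - 1) = ((cs.length : Nat) : Int) from by ring] at h
      simp only [List.length_cons]
      push_cast
      exact propext h
    simp only [List.cons_append, insChars, ih, List.append_assoc, hm]

theorem ins_congr (dl : List Char) : ∀ (cs : List Char) (L1 L2 : List Int),
    (∀ i : Nat, i < cs.length → (((i : Int) ∈ L1) ↔ ((i : Int) ∈ L2))) →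
    insChars dl L1 cs = insChars dl L2 cs := by
  intro cs
  induction cs with
  | nil => intros; rfl
  | cons c cs ih =>
    intro L1 L2 h
    have h0 : ((0:Int) ∈ L1) ↔ ((0:Int) ∈ L2) := by simpa using h 0 (by simp)
    simp only [insChars]
    rw [if_congr h0 rfl rfl, ih (L1.map (fun q => q - 1)) (L2.map (fun q => q - 1)) ?_]
    intro i hi
    have hm1 := mem_map_sub L1 1 ((i : Int) + 1)
    have hm2 := mem_map_sub L2 1 ((i : Int) + 1)
    rw [show ((i : Int) + 1 - 1) = (i : Int) from by ring] at hm1 hm2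
    have hh := h (i + 1) (by simpa using hi)
    push_cast at hh
    rw [hm1, hm2]
    exact hh

theorem ains (dl : List Char) (L : List Int) (cs : List Char) : ∀ (n : Nat), n ≤ cs.length → ∀ (a : List Char),
    (List.range n).foldl (fun nl j =>
      if ¬ ((j : Nat) : Int) ∈ L then nl ++ [PySem.List.pyGetD cs ((j : Nat) : Int) ' ']
      else nl ++ dl ++ [PySem.List.pyGetD cs ((j : Nat) : Int) ' ']) a
    = a ++ insChars dl L (cs.take n) := by
  intro n
  induction n with
  | zero => intro _ a; simp [insChars]
  | succ n ih =>
    intro hn a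
    rw [List.range_succ, List.foldl_append]
    rw [ih (by omega) a]
    simp only [List.foldl_cons, List.foldl_nil]
    have hget : PySem.List.pyGetD cs ((n : Nat) : Int) ' ' = cs[n]'(by omega) := by
      rw [PySem.List.pyGetD_natCast]
      exact List.getD_eq_getElem cs ' ' (by omega)
    have htake : cs.take (n + 1) = cs.take n ++ [cs[n]'(by omega)] := by
      rw [List.take_add_one, List.getElem?_eq_getElem (by omega)]
      simp
    rw [htake, ins_snoc]
    have hlen : ((cs.take n).length : Int) = ((n : Nat) : Int) := by
      simp [List.length_take]
      omega
    by_cases hmem : ((n : Nat) : Int) ∈ L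
    · rw [if_neg (by simpa using hmem), if_pos (by rw [hlen]; exact hmem)]
      simp [hget, List.append_assoc]
    · rw [if_pos (by simpa using hmem), if_neg (by rw [hlen]; exact hmem)]
      simp [hget, List.append_assoc]

theorem comp_map (locs : List Int) (c : Int) :
    (PySem.List.pyRange 0 (PySem.List.len locs) 1).map (fun i => PySem.List.pyGetD locs i 0 + c)
      = locs.map (fun l => l + c) := by
  have : (fun i => PySem.List.pyGetD locs i 0 + c)
      = (fun x => x + c) ∘ (fun i => PySem.List.pyGetD locs i 0) := rfl
  rw [this, ← List.map_map, PySem.List.map_pyGetD_pyRange_zero]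

theorem line_eq (delim : String) (L : List Int) (s : String) :
    (PySem.List.pyRange 0 (PySem.Str.len s) 1).foldl (fun nl i =>
      if ¬ i ∈ L then nl ++ [PySem.List.pyGetD s.toList i ' ']
      else nl ++ delim.toList ++ [PySem.List.pyGetD s.toList i ' ']) []
    = PySem.Chars.join delim.toList (splitAtPts s.toList
        ((PySem.List.sorted (PySem.Set.ofList L) (fun x => x) false).filter
          (fun p => decide (0 ≤ p ∧ p < PySem.Str.len s)))) := by
  rw [PySem.Str.len_eq, PySem.List.pyRange_zero_natCast, List.foldl_map]
  rw [ains delim.toList L s.toList s.toList.length le_rfl []]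
  rw [List.take_of_length_le le_rfl]
  have hpw : (((PySem.List.sorted (PySem.Set.ofList L) (fun x => x) false).filter
      (fun p => decide (0 ≤ p ∧ p < ((s.toList.length : Nat) : Int))))).Pairwise (· < ·) :=
    (PySem.List.sorted_ofList_pairwise_lt L).filter _
  have hb : ∀ p ∈ ((PySem.List.sorted (PySem.Set.ofList L) (fun x => x) false).filter
      (fun p => decide (0 ≤ p ∧ p < ((s.toList.length : Nat) : Int)))),
      0 ≤ p ∧ p < (s.toList.length : Int) := by
    intro p hp
    have := List.of_mem_filter hp
    simpa using this
  rw [join_split delim.toList _ s.toList hpw hb]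
  rw [List.nil_append]
  apply ins_congr
  intro i hi
  simp only [List.mem_filter, PySem.List.mem_sorted, PySem.Set.mem_ofList, decide_eq_true_eq]
  constructor
  · exact fun h => ⟨h, Int.natCast_nonneg i, by exact_mod_cast hi⟩
  · exact fun h => h.1

-- ===== VERDICT (by name: the statement is the Claim_ definition above) =====
theorem insert_delim_spec : Claim_equal_insert_delim := by
  intro t_data locs header_line delim _ _
  unfold Spec_insert_delim insert_delim insert_delim_alt
  by_cases hd : 2 ≤ PySem.Str.len delim <;>
    simp only [hd, ite_true, ite_false] <;>
    rw [comp_map] <;>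
    · apply List.foldl_ext
      intro acc line _
      apply congrArg
      exact congrArg String.ofList (line_eq delim _ (PySem.List.pyGetD acc line ""))
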